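-- pv_equiv track=rewrite | github.com/JoseRPrietoF/tableIE | GNN/information_extraction/headers.py | get_class_dic
-- ===== SOURCE A (Python) =====
-- def get_class_dic(lines:list):
--     res = {}
--     lastCategory = ""
--     cont = -1
--     dict_c_to_header = {}
--     for line in lines:
--         if lastCategory == "":
--             lastCategory = line
--             cont += 1
--             dict_c_to_header[cont] = line
--         else:
--             if line == "#":
--                 lastCategory = ""
--             else:
--                 # res[line] = lastCategory
--                 res[line] = cont
--     return res, dict_c_to_header
-- ===== SOURCE B (Python) =====
-- def get_class_dic(lines: list):
--     res = {}
--     headers = {}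
--     group = -1
--     i = 0
--     n = len(lines)
--     while i < n:
--         group += 1
--         headers[group] = lines[i]
--         i += 1
--         while i < n and lines[i] != "#":
--             res[lines[i]] = group
--             i += 1
--         i += 1  # skip the separator
--     return res, headers
-- ===== Notes on version B (the rewrite author's own statement) =====
-- stated objective: simpler
-- what changed: Replaced A's flat flag-based state machine (a lastCategory sentinel toggled per line) with an index-driven nested loop: the outer loop consumes one header per group, the inner loop maps member lines until the '#' separator; Pre_ excludes inputs where an empty-string line starts the input or follows a '#' or another empty line, since '' is A's no-current-header sentinel and the grouping of an empty line in the header slot is unspecified, both readings being defensible.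
-- outside the precondition, e.g. on get_class_dic(['', 'a']): A returns ({}, {0: '', 1: 'a'}), B returns ({'a': 0}, {0: ''})
import Mathlib
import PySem

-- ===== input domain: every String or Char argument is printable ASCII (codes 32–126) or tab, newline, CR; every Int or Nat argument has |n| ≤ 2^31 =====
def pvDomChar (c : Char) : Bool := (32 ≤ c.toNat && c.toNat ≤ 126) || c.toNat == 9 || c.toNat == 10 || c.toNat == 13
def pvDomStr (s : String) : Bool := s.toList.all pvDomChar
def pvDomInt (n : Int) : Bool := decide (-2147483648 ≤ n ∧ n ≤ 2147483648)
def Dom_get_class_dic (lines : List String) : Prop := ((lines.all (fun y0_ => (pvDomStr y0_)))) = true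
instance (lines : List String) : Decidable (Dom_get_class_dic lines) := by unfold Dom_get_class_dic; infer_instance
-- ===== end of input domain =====

-- B rewrites A's flag-driven state machine as an index-driven nested loop over groups (simpler decomposition; same cost).

-- ===== PORT A =====
-- one fold step of A's for-loop over (res, lastCategory, cont, dict_c_to_header)
def pvStepA (st : PySem.Dict String Int × String × Int × PySem.Dict Int String) (line : String) :
    PySem.Dict String Int × String × Int × PySem.Dict Int String :=
  if st.2.1 == "" then
    (st.1, line, st.2.2.1 + 1, (st.2.2.2).insert (st.2.2.1 + 1) line)
  else if line == "#" then
    (st.1, "", st.2.2.1, st.2.2.2)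
  else
    ((st.1).insert line st.2.2.1, st.2.1, st.2.2.1, st.2.2.2)

def get_class_dic (lines : List String) : (List (String × Int)) × (List (Int × String)) :=
  let st := lines.foldl pvStepA (PySem.Dict.empty, "", -1, PySem.Dict.empty)
  (st.1.items, st.2.2.2.items)

-- ===== PORT B =====
-- inner while: map member lines to `group` until a '#' (which is skipped) or end of input;
-- returns the remaining lines and the updated res
def pvInner (group : Int) : List String → PySem.Dict String Int →
    List String × PySem.Dict String Int
  | [], res => ([], res)
  | l :: rest, res =>
      if l == "#" then (rest, res) else pvInner group rest (res.insert l group)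

lemma pvInner_length_le (group : Int) (l : List String) (res : PySem.Dict String Int) :
    (pvInner group l res).1.length ≤ l.length := by
  induction l generalizing res with
  | nil => simp [pvInner]
  | cons a rest ih =>
      simp only [pvInner]
      split
      · simp
      · exact le_trans (ih _) (Nat.le_succ _)

-- outer while: consume one header line, then run the inner loop on the remaining lines
def pvOuter : List String → PySem.Dict String Int → Int → PySem.Dict Int String →
    PySem.Dict String Int × PySem.Dict Int String
  | [], res, _, hdr => (res, hdr)
  | h :: rest, res, group, hdr =>
      let p := pvInner (group + 1) rest res
      pvOuter p.1 p.2 (group + 1) (hdr.insert (group + 1) h)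
termination_by l _ _ _ => l.length
decreasing_by
  exact Nat.lt_succ_of_le (pvInner_length_le _ _ _)

def get_class_dic_alt (lines : List String) : (List (String × Int)) × (List (Int × String)) :=
  let p := pvOuter lines PySem.Dict.empty (-1) PySem.Dict.empty
  (p.1.items, p.2.items)

-- ===== PRECONDITION & SPEC =====
-- Pre_ excludes inputs where an empty-string line starts the input or follows a "#" or another
-- empty line — the positions where it can land in the header slot: "" is A's no-current-header
-- sentinel, so the grouping there is unspecified and A's and B's readings are both defensible.
-- adjacency check: no empty line right after a "#" or after another empty line
def pvAdjOK : List String → Bool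
  | a :: b :: rest => (!(b == "") || (!(a == "#") && !(a == ""))) && pvAdjOK (b :: rest)
  | _ => true

def Pre_get_class_dic (lines : List String) : Prop :=
  (∀ hd ∈ lines.head?, hd ≠ "") ∧ pvAdjOK lines = true
instance (lines : List String) : Decidable (Pre_get_class_dic lines) := by unfold Pre_get_class_dic; infer_instance

def pvWitness_get_class_dic : List String := ["h", "a", "#", "g", "b"]

def Spec_get_class_dic (lines : List String) (out : (List (String × Int)) × (List (Int × String))) : Prop := out = get_class_dic_alt lines
instance (lines : List String) (out : (List (String × Int)) × (List (Int × String))) : Decidable (Spec_get_class_dic lines out) := by unfold Spec_get_class_dic; infer_instance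

-- ===== CLAIM (what is proved, stated in full; the proofs are below) =====
def Claim_equal_get_class_dic : Prop := ∀ (lines : List String), Dom_get_class_dic lines → Pre_get_class_dic lines → Spec_get_class_dic lines (get_class_dic lines)

-- ===== LEMMAS AND PROOFS =====

lemma pvAdjOK_tail (a : String) (l : List String) (h : pvAdjOK (a :: l) = true) :
    pvAdjOK l = true := by
  cases l with
  | nil => simp [pvAdjOK]
  | cons b rs =>
      simp only [pvAdjOK, Bool.and_eq_true] at h
      exact h.2

-- the list left over by pvInner still has a non-empty head and keeps the adjacency property
lemma pvInner_pred (group : Int) (l : List String) (res : PySem.Dict String Int)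
    (hc : pvAdjOK l = true) :
    (∀ hd ∈ (pvInner group l res).1.head?, hd ≠ "") ∧
      pvAdjOK (pvInner group l res).1 = true := by
  induction l generalizing res with
  | nil => simp [pvInner, pvAdjOK]
  | cons a rest ih =>
      simp only [pvInner]
      split
      · rename_i ha
        have ha' : a = "#" := by simpa using ha
        subst ha'
        refine ⟨?_, pvAdjOK_tail _ _ hc⟩
        cases rest with
        | nil => simp
        | cons b rs =>
            intro hd hhd heq
            simp only [List.head?_cons, Option.mem_def, Option.some.injEq] at hhd
            subst hhd
            subst heq
            simp [pvAdjOK] at hc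
      · exact ih _ (pvAdjOK_tail _ _ hc)

-- with lastCategory ≠ "", A's fold over l behaves like pvInner followed by the fold from the reset state
lemma foldA_inner (l : List String) (res : PySem.Dict String Int) (lc : String) (cont : Int)
    (hdr : PySem.Dict Int String) (hlc : lc ≠ "") :
    ((List.foldl pvStepA (res, lc, cont, hdr) l).1,
        (List.foldl pvStepA (res, lc, cont, hdr) l).2.2.2) =
      ((List.foldl pvStepA ((pvInner cont l res).2, "", cont, hdr) (pvInner cont l res).1).1,
        (List.foldl pvStepA ((pvInner cont l res).2, "", cont, hdr) (pvInner cont l res).1).2.2.2) := by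
  induction l generalizing res with
  | nil => simp [pvInner]
  | cons a rest ih =>
      have hbe : (lc == "") = false := by simpa using hlc
      simp only [pvInner, List.foldl_cons, pvStepA, hbe, Bool.false_eq_true, if_false]
      by_cases ha : a = "#"
      · simp [ha]
      · have hab : (a == "#") = false := by simpa using ha
        simp only [hab, Bool.false_eq_true, if_false]
        exact ih _

-- from a reset state, on lines whose header slots are non-empty, A's fold computes exactly pvOuter
lemma foldA_outer (l : List String) (res : PySem.Dict String Int) (cont : Int)
    (hdr : PySem.Dict Int String)
    (hne : (∀ hd ∈ l.head?, hd ≠ "") ∧ pvAdjOK l = true) :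
    ((List.foldl pvStepA (res, "", cont, hdr) l).1,
        (List.foldl pvStepA (res, "", cont, hdr) l).2.2.2) =
      pvOuter l res cont hdr := by
  induction l, res, cont, hdr using pvOuter.induct with
  | case1 res cont hdr => simp [pvOuter]
  | case2 h rest res cont hdr p ih =>
      have hh : h ≠ "" := hne.1 h rfl
      have hrest := pvAdjOK_tail h rest hne.2
      simp only [pvOuter, List.foldl_cons, pvStepA, beq_self_eq_true, if_true]
      rw [foldA_inner rest res h (cont + 1) (hdr.insert (cont + 1) h) hh]
      exact ih (pvInner_pred _ _ _ hrest)

-- ===== VERDICT (by name: the statement is the Claim_ definition above) =====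
theorem get_class_dic_spec : Claim_equal_get_class_dic := by
  intro lines _ hpre
  show _ = _
  unfold get_class_dic get_class_dic_alt
  have h := foldA_outer lines PySem.Dict.empty (-1) PySem.Dict.empty hpre
  have h1 := congrArg Prod.fst h
  have h2 := congrArg Prod.snd h
  simp only at h1 h2 ⊢
  rw [h1, h2]
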